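-- pv_equiv track=rewrite | github.com/yclee1996/vasp_vibration_para | merged_nma.py | three_entry_in_line_uniform_string
-- ===== SOURCE A (Python) =====
-- def three_entry_in_line_uniform_string(str_list):
--     return_list = []
--     counter = 0
--     current_line = "    "
--     for i in range(0, len(str_list)):
--         space = " " * (3-len(str_list[i]))
--
--         current_line += space + str_list[i]
--         counter += 1
--         if counter == 3 :
--             return_list.append(current_line)
--             current_line = "    "
--             counter = 0
--
--     return return_list
-- ===== SOURCE B (Python) =====
-- def three_entry_in_line_uniform_string(str_list):
--     n_lines = len(str_list) // 3
--     result = []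
--     for i in range(n_lines):
--         group = str_list[3*i:3*i+3]
--         result.append("    " + "".join(" " * (3 - len(s)) + s for s in group))
--     return result
-- ===== Notes on version B (the rewrite author's own statement) =====
-- stated objective: simpler
-- what changed: B computes the number of full lines as len//3 up front and builds each line from a 3-element slice with a join, instead of A's per-element loop with a running counter and mutable current line.
import Mathlib
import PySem

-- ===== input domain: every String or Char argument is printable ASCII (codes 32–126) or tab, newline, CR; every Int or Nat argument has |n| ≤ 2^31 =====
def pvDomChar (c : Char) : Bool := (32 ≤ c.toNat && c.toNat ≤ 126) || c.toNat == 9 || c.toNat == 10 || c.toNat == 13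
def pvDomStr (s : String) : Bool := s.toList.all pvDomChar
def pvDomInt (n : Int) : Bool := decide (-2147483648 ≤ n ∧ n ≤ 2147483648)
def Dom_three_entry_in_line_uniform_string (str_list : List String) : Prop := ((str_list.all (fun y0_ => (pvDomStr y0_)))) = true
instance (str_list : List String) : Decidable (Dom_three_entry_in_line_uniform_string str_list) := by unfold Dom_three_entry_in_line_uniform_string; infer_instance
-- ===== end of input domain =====

-- B builds each output line from a 3-element slice with a join (line count = len // 3 up front)
-- instead of A's per-element loop with a running counter; same result, simpler decomposition.

-- ===== PORT A =====
-- A: single pass over the elements, state = (return_list, counter, current_line)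
def pvStepA (st : List String × Int × String) (s : String) : List String × Int × String :=
  let space := String.ofList (List.replicate (3 - s.length) ' ')
  let current_line := st.2.2 ++ space ++ s
  let counter := st.2.1 + 1
  if counter == 3 then (st.1 ++ [current_line], 0, "    ") else (st.1, counter, current_line)

def three_entry_in_line_uniform_string (str_list : List String) : List String :=
  (str_list.foldl pvStepA ([], 0, "    ")).1

-- ===== PORT B =====
-- B: "".join(" "*(3-len(s)) + s for s in group) over the slice str_list[3*i:3*i+3]
def three_entry_in_line_uniform_string_alt (str_list : List String) : List String :=
  (List.range (str_list.length / 3)).map (fun (i : Nat) =>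
    "    " ++ String.join
      ((PySem.List.slice str_list (some (3 * (i : Int))) (some (3 * (i : Int) + 3))).map
        (fun s => String.ofList (List.replicate (3 - s.length) ' ') ++ s)))

-- ===== PRECONDITION & SPEC =====
def Spec_three_entry_in_line_uniform_string (str_list : List String) (out : List String) : Prop := out = three_entry_in_line_uniform_string_alt str_list
instance (str_list : List String) (out : List String) : Decidable (Spec_three_entry_in_line_uniform_string str_list out) := by unfold Spec_three_entry_in_line_uniform_string; infer_instance

-- ===== CLAIM (what is proved, stated in full; the proofs are below) =====
def Claim_equal_three_entry_in_line_uniform_string : Prop := ∀ (str_list : List String), Dom_three_entry_in_line_uniform_string str_list → Spec_three_entry_in_line_uniform_string str_list (three_entry_in_line_uniform_string str_list)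

-- ===== LEMMAS AND PROOFS =====

def pvPad (s : String) : String := String.ofList (List.replicate (3 - s.length) ' ') ++ s

-- reference: lines taken three at a time, trailing partial group dropped
def pvChunk3 : List String → List String
  | a :: b :: c :: rest => ("    " ++ pvPad a ++ pvPad b ++ pvPad c) :: pvChunk3 rest
  | _ => []

theorem foldA_eq_chunk3 (l : List String) (acc : List String) :
    (l.foldl pvStepA (acc, 0, "    ")).1 = acc ++ pvChunk3 l := by
  induction l using pvChunk3.induct generalizing acc with
  | case1 a b c rest ih =>
      rw [List.foldl_cons, List.foldl_cons, List.foldl_cons]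
      have h1 : pvStepA (acc, (0 : Int), "    ") a = (acc, 1, "    " ++ pvPad a) := by
        simp [pvStepA, pvPad, String.append_assoc]
      have h2 : pvStepA (acc, (1 : Int), "    " ++ pvPad a) b
          = (acc, 2, "    " ++ pvPad a ++ pvPad b) := by
        simp [pvStepA, pvPad, String.append_assoc]
      have h3 : pvStepA (acc, (2 : Int), "    " ++ pvPad a ++ pvPad b) c
          = (acc ++ ["    " ++ pvPad a ++ pvPad b ++ pvPad c], 0, "    ") := by
        simp [pvStepA, pvPad, String.append_assoc]
      rw [h1, h2, h3, ih]
      simp [pvChunk3]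
  | case2 l h =>
      rcases l with _ | ⟨a, _ | ⟨b, _ | ⟨c, r⟩⟩⟩
      · simp [pvChunk3]
      · simp [pvChunk3, List.foldl, pvStepA]
      · simp [pvChunk3, List.foldl, pvStepA]
      · exact (h a b c r rfl).elim

theorem altB_eq_chunk3 (l : List String) :
    three_entry_in_line_uniform_string_alt l = pvChunk3 l := by
  induction l using pvChunk3.induct with
  | case1 a b c rest ih =>
      unfold three_entry_in_line_uniform_string_alt at ih ⊢
      have hlen : (a :: b :: c :: rest).length / 3 = rest.length / 3 + 1 := by
        simp [List.length]; omega
      rw [hlen, List.range_succ_eq_map]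
      simp only [List.map_cons, List.map_map]
      unfold pvChunk3
      congr 1
      rw [← ih]
      apply List.map_congr_left
      intro i _
      have e1 : (3 * ((Nat.succ i : Nat) : Int)) = (((3 * i + 3 : Nat) : Int)) := by
        push_cast; ring
      have e2 : (3 * ((Nat.succ i : Nat) : Int) + 3) = (((3 * i + 6 : Nat) : Int)) := by
        push_cast; ring
      have e3 : (3 * ((i : Nat) : Int)) = (((3 * i : Nat) : Int)) := by push_cast; ring
      have e4 : (3 * ((i : Nat) : Int) + 3) = (((3 * i + 3 : Nat) : Int)) := by push_cast; ring
      have hd : (a :: b :: c :: rest).drop (3 * i + 3) = rest.drop (3 * i) := by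
        have h33 : 3 * i + 3 = 3 * i + 1 + 1 + 1 := by ring
        rw [h33, List.drop_succ_cons, List.drop_succ_cons, List.drop_succ_cons]
      have hsl : PySem.List.slice (a :: b :: c :: rest) (some (3 * ((Nat.succ i : Nat) : Int)))
          (some (3 * ((Nat.succ i : Nat) : Int) + 3))
          = PySem.List.slice rest (some (3 * ((i : Nat) : Int)))
            (some (3 * ((i : Nat) : Int) + 3)) := by
        rw [e2, e1, e4, e3, PySem.List.slice_natCast, PySem.List.slice_natCast, hd]
        have hs1 : 3 * i + 6 - (3 * i + 3) = 3 := by omega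
        have hs2 : 3 * i + 3 - 3 * i = 3 := by omega
        rw [hs1, hs2]
      simp only [Function.comp_apply, hsl]
  | case2 l h =>
      rcases l with _ | ⟨a, _ | ⟨b, _ | ⟨c, r⟩⟩⟩
      · simp [three_entry_in_line_uniform_string_alt, pvChunk3]
      · simp [three_entry_in_line_uniform_string_alt, pvChunk3]
      · simp [three_entry_in_line_uniform_string_alt, pvChunk3]
      · exact (h a b c r rfl).elim

-- ===== VERDICT (by name: the statement is the Claim_ definition above) =====
theorem three_entry_in_line_uniform_string_spec : Claim_equal_three_entry_in_line_uniform_string := by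
  intro l _
  unfold Spec_three_entry_in_line_uniform_string three_entry_in_line_uniform_string
  rw [foldA_eq_chunk3 l [], altB_eq_chunk3]
  simp
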